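-- pv_equiv track=rewrite | github.com/jesnyder/spaceWork | user_provided/python/meta_pubs.py | add_affs
-- ===== SOURCE A (Python) =====
-- def add_affs(pub):
--     """
--     list unique affiliations for each pub
--     """
--     affs = []
--
--     if 'author' not in pub.keys(): return(affs)
--
--     for author in pub['author']:
--
--         if 'affiliation' not in author.keys(): continue
--         for affiliation in author['affiliation']:
--
--             if 'name' not in affiliation.keys(): continue
--             aff = affiliation['name']
--
--             if aff in affs: continue
--             affs.append(aff)
--
--     return(affs)
-- ===== SOURCE B (Python) =====
-- def add_affs(pub):
--     """
--     list unique affiliations for each pub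
--     """
--     names = [affiliation['name']
--              for author in pub.get('author', [])
--              for affiliation in author.get('affiliation', [])
--              if 'name' in affiliation]
--     # head-and-filter nub: repeatedly emit the first remaining name and
--     # delete all of its later copies, so no membership test is ever needed
--     affs = []
--     while names:
--         head = names[0]
--         affs.append(head)
--         names = [x for x in names[1:] if x != head]
--     return affs
-- ===== Notes on version B (the rewrite author's own statement) =====
-- stated objective: alternative
-- what changed: B first gathers all affiliation names in one flat comprehension, then deduplicates by a head-and-filter nub loop (emit first remaining element, filter out its copies from the rest), so it maintains no seen-set and performs no membership tests, unlike A's single pass with an 'aff in affs' check.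
import Mathlib
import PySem

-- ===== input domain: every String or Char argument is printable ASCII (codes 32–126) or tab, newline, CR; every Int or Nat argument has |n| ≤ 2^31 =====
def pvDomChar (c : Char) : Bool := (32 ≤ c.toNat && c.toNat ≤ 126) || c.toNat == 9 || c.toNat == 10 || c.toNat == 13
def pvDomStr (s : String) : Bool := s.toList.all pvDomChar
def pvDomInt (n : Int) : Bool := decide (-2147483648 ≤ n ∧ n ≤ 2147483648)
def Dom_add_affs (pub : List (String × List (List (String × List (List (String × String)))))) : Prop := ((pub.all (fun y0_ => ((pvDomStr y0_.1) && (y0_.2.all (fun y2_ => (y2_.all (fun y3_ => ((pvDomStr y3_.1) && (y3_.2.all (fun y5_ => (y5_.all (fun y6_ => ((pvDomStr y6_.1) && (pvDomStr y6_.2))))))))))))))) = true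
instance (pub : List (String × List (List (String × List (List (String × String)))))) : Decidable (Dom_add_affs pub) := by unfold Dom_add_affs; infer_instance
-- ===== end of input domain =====

-- B gathers all affiliation names in one flat pass, then deduplicates by a head-and-filter
-- nub loop (no seen-set, no membership test); return value proven equal to A's.

-- ===== PORT A =====
def add_affs (pub : List (String × List (List (String × List (List (String × String)))))) : List String :=
  match (PySem.Dict.mk pub).get? "author" with
  | none => []
  | some authors =>
    authors.foldl (fun affs author =>
      match (PySem.Dict.mk author).get? "affiliation" with
      | none => affs
      | some affiliations =>
        affiliations.foldl (fun affs affiliation =>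
          match (PySem.Dict.mk affiliation).get? "name" with
          | none => affs
          | some aff => if aff ∈ affs then affs else affs ++ [aff]) affs) []

-- ===== PORT B =====
-- B's while loop: emit the first remaining name, filter its copies out of the rest.
def nubLoop (affs : List String) (names : List String) : List String :=
  match names with
  | [] => affs
  | head :: rest => nubLoop (affs ++ [head]) (rest.filter (fun x => x ≠ head))
termination_by names.length
decreasing_by
  have h1 := List.length_filter_le (fun x => !decide ((x : {y // y ∈ rest}).1 = head)) rest.attach
  simp only [List.length_attach] at h1
  simp
  omega

def add_affs_alt (pub : List (String × List (List (String × List (List (String × String)))))) : List String :=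
  let names := ((PySem.Dict.mk pub).getD "author" []).flatMap (fun author =>
    ((PySem.Dict.mk author).getD "affiliation" []).filterMap (fun affiliation =>
      (PySem.Dict.mk affiliation).get? "name"))
  nubLoop [] names

-- ===== PRECONDITION & SPEC =====
def Spec_add_affs (pub : List (String × List (List (String × List (List (String × String)))))) (out : List String) : Prop := out = add_affs_alt pub
instance (pub : List (String × List (List (String × List (List (String × String)))))) (out : List String) : Decidable (Spec_add_affs pub out) := by unfold Spec_add_affs; infer_instance

-- ===== CLAIM (what is proved, stated in full; the proofs are below) =====
def Claim_equal_add_affs : Prop := ∀ (pub : List (String × List (List (String × List (List (String × String)))))), Dom_add_affs pub → Spec_add_affs pub (add_affs pub)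

-- ===== LEMMAS AND PROOFS =====

lemma nubLoop_nil (affs : List String) : nubLoop affs [] = affs := by
  rw [nubLoop.eq_def]

lemma nubLoop_cons (affs : List String) (head : String) (rest : List String) :
    nubLoop affs (head :: rest) = nubLoop (affs ++ [head]) (rest.filter (fun x => x ≠ head)) := by
  rw [nubLoop.eq_def]

lemma inner_upd (l : List (List (String × String))) (acc : List String) :
    l.foldl (fun affs affiliation =>
      match (PySem.Dict.mk affiliation).get? "name" with
      | none => affs
      | some aff => if aff ∈ affs then affs else affs ++ [aff]) acc
    = PySem.Set.update acc (l.filterMap (fun affiliation => (PySem.Dict.mk affiliation).get? "name")) := by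
  induction l generalizing acc with
  | nil => simp [PySem.Set.update]
  | cons a t ih =>
    cases h : (PySem.Dict.mk a).get? "name" with
    | none => simp [h, ih]
    | some v =>
      simp only [List.foldl_cons, List.filterMap_cons, h, ih, PySem.Set.update, List.foldl_cons]
      congr 1
      simp [PySem.Set.add, PySem.Set.contains]

lemma outer_upd (authors : List (List (String × List (List (String × String))))) (acc : List String) :
    authors.foldl (fun affs author =>
      match (PySem.Dict.mk author).get? "affiliation" with
      | none => affs
      | some affiliations =>
        affiliations.foldl (fun affs affiliation =>
          match (PySem.Dict.mk affiliation).get? "name" with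
          | none => affs
          | some aff => if aff ∈ affs then affs else affs ++ [aff]) affs) acc
    = PySem.Set.update acc (authors.flatMap (fun author =>
        ((PySem.Dict.mk author).getD "affiliation" []).filterMap
          (fun affiliation => (PySem.Dict.mk affiliation).get? "name"))) := by
  induction authors generalizing acc with
  | nil => simp [PySem.Set.update]
  | cons a t ih =>
    cases h : (PySem.Dict.mk a).get? "affiliation" with
    | none => simp [h, ih, PySem.Set.update, PySem.Dict.getD]
    | some affs =>
      simp only [List.foldl_cons, h]
      rw [ih, inner_upd]
      simp [PySem.Set.update, List.flatMap_cons, h, List.foldl_append, PySem.Dict.getD]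

-- updating a set with a list minus an element already present changes nothing extra
lemma update_filter_of_mem (t : List String) (acc : List String) (h : String)
    (hmem : h ∈ acc) :
    PySem.Set.update acc (t.filter (fun x => x ≠ h)) = PySem.Set.update acc t := by
  induction t generalizing acc with
  | nil => rfl
  | cons a s ih =>
    by_cases ha : a = h
    · subst ha
      have hadd : PySem.Set.add acc a = acc := by
        simp [PySem.Set.add, PySem.Set.contains, hmem]
      have hih := ih acc hmem
      simp only [PySem.Set.update] at hih ⊢
      simp only [List.filter_cons, List.foldl_cons, hadd]
      simpa using hih
    · have hmem' : h ∈ PySem.Set.add acc a := by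
        simp [PySem.Set.add, PySem.Set.contains]
        split <;> simp [hmem]
      have hih := ih (PySem.Set.add acc a) hmem'
      simp only [PySem.Set.update] at hih ⊢
      simp only [List.filter_cons, List.foldl_cons]
      have hkeep : (decide (a ≠ h)) = true := by simp [ha]
      simp only [hkeep, if_true]
      simpa using hih

lemma set_update_eq_nubLoop_aux (n : Nat) : ∀ (names acc : List String),
    names.length ≤ n → (∀ x ∈ acc, x ∉ names) →
    PySem.Set.update acc names = nubLoop acc names := by
  induction n with
  | zero =>
    intro names acc hlen _
    have : names = [] := List.eq_nil_of_length_eq_zero (Nat.le_zero.1 hlen)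
    subst this
    simp [PySem.Set.update, nubLoop_nil]
  | succ n ih =>
    intro names acc hlen hd
    match names with
    | [] => simp [PySem.Set.update, nubLoop_nil]
    | head :: rest =>
      have hhead : head ∉ acc := fun hmem => hd head hmem (by simp)
      have hadd : PySem.Set.add acc head = acc ++ [head] := by
        simp [PySem.Set.add, PySem.Set.contains, hhead]
      have hd' : ∀ x ∈ acc ++ [head], x ∉ rest.filter (fun x => x ≠ head) := by
        intro x hx hxin
        rcases List.mem_append.1 hx with hx | hx
        · exact hd x hx (List.mem_cons_of_mem _ (List.mem_of_mem_filter hxin))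
        · have : x = head := by simpa using hx
          subst this
          have := List.of_mem_filter hxin
          simp at this
      have step : PySem.Set.update acc (head :: rest)
          = PySem.Set.update (acc ++ [head]) (rest.filter (fun x => x ≠ head)) := by
        simp only [PySem.Set.update, List.foldl_cons, hadd]
        exact (update_filter_of_mem rest (acc ++ [head]) head (by simp)).symm
      have hlen' : (rest.filter (fun x => x ≠ head)).length ≤ n := by
        have := List.length_filter_le (fun x => decide (x ≠ head)) rest
        simp at hlen
        omega
      rw [step, ih _ _ hlen' hd', nubLoop_cons]

lemma set_update_eq_nubLoop (names : List String) (acc : List String)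
    (hd : ∀ x ∈ acc, x ∉ names) :
    PySem.Set.update acc names = nubLoop acc names :=
  set_update_eq_nubLoop_aux names.length names acc (Nat.le_refl _) hd

-- ===== VERDICT (by name: the statement is the Claim_ definition above) =====
theorem add_affs_spec : Claim_equal_add_affs := by
  intro pub _
  unfold Spec_add_affs add_affs add_affs_alt
  cases h : (PySem.Dict.mk pub).get? "author" with
  | none => simp [PySem.Dict.getD, h, nubLoop_nil]
  | some authors =>
    simp only [PySem.Dict.getD, h, Option.getD_some]
    rw [outer_upd]
    exact set_update_eq_nubLoop _ [] (by simp)
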